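-- pv_equiv track=rewrite | github.com/FraLiturri/Project-Euler | 026-050/033.py | simplifier
-- ===== SOURCE A (Python) =====
-- def simplifier(num, den):
--     if den % 10 != 0:
--         for num_dig in str(num):
--             num_aux = list(str(num))
--             den_aux = list(str(den))
--
--             if num_dig in str(den):
--                 num_aux.remove(num_dig)
--                 den_aux.remove(num_dig)
--     return [num_aux, den_aux]
-- ===== SOURCE B (Python) =====
-- def simplifier(num, den):
--     # No loop: A's for-loop rebuilds its lists every iteration, so only the
--     # last digit of num ever matters; compute directly from it.  Returns the
--     # unmodified digit lists when den is a multiple of 10 (where A raises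
--     # UnboundLocalError).
--     num_aux = list(str(num))
--     den_aux = list(str(den))
--     last = num_aux[-1]
--     if den % 10 != 0 and last in den_aux:
--         num_aux.remove(last)
--         den_aux.remove(last)
--     return [num_aux, den_aux]
-- ===== Notes on version B (the rewrite author's own statement) =====
-- stated objective: simpler
-- what changed: B drops A's loop over the digits of num (which rebuilds its lists every iteration, so only the final iteration survives) and computes the result straight-line from the last digit of str(num); where A raises UnboundLocalError (den a multiple of 10, outside Pre_) B just returns the unmodified digit lists.
import Mathlib
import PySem

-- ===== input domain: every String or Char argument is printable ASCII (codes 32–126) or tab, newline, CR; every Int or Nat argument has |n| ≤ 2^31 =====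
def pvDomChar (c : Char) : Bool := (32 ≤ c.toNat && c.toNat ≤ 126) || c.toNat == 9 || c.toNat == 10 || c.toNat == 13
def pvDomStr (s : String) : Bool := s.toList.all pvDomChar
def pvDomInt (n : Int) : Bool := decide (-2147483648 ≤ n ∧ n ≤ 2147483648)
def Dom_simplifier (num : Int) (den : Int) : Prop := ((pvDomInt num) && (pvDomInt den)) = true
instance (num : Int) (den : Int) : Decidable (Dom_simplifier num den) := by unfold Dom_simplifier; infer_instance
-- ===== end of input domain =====

-- B removes A's dead per-digit loop and computes straight-line from the last digit of str(num);
-- equal return values on Pre_ (den % 10 ≠ 0, i.e. wherever Python A returns rather than raising).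

-- ===== PORT A =====
-- A: if den % 10 != 0, loop over the characters of str(num); every iteration REBUILDS
-- num_aux/den_aux from scratch and conditionally removes the current digit.
-- The loop state is an Option pair: none = the Python name is still unbound
-- (reaching the return with none is Python's UnboundLocalError; excluded by Pre_, .getD [] there).
def simplifier (num : Int) (den : Int) : List (List String) :=
  let st : Option (List String) × Option (List String) :=
    if PySem.Int.mod den 10 ≠ 0 then
      (PySem.Int.toChars num).foldl (fun _st num_dig =>
        let num_aux := (PySem.Int.toChars num).map (fun c => String.ofList [c])
        let den_aux := (PySem.Int.toChars den).map (fun c => String.ofList [c])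
        if PySem.Str.isIn (String.ofList [num_dig]) (PySem.Int.toStr den) then
          -- num_dig is drawn from str(num), so both remove? are never none here
          (some ((PySem.List.remove? num_aux (String.ofList [num_dig])).getD num_aux),
           some ((PySem.List.remove? den_aux (String.ofList [num_dig])).getD den_aux))
        else
          (some num_aux, some den_aux)) (none, none)
    else (none, none)
  [st.1.getD [], st.2.getD []]

-- ===== PORT B =====
def simplifier_alt (num : Int) (den : Int) : List (List String) :=
  let num_aux := (PySem.Int.toChars num).map (fun c => String.ofList [c])
  let den_aux := (PySem.Int.toChars den).map (fun c => String.ofList [c])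
  -- num_aux[-1]: str(num) is never empty, so pyGet? is never none (.getD "" unreachable)
  let last := (PySem.List.pyGet? num_aux (-1)).getD ""
  if decide (PySem.Int.mod den 10 ≠ 0) && den_aux.contains last then
    -- last ∈ num_aux and (by the guard) last ∈ den_aux, so both remove? are never none
    [(PySem.List.remove? num_aux last).getD num_aux,
     (PySem.List.remove? den_aux last).getD den_aux]
  else
    [num_aux, den_aux]

-- ===== PRECONDITION & SPEC =====
-- Pre_ excludes den % 10 == 0, where Python A raises UnboundLocalError (its loop never runs).
def Pre_simplifier (num : Int) (den : Int) : Prop := PySem.Int.mod den 10 ≠ 0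
instance (num : Int) (den : Int) : Decidable (Pre_simplifier num den) := by unfold Pre_simplifier; infer_instance
def pvWitness_simplifier : Int × Int := (49, 98)

def Spec_simplifier (num : Int) (den : Int) (out : List (List String)) : Prop := out = simplifier_alt num den
instance (num : Int) (den : Int) (out : List (List String)) : Decidable (Spec_simplifier num den out) := by unfold Spec_simplifier; infer_instance

-- ===== CLAIM (what is proved, stated in full; the proofs are below) =====
def Claim_equal_simplifier : Prop := ∀ (num : Int) (den : Int), Dom_simplifier num den → Pre_simplifier num den → Spec_simplifier num den (simplifier num den)

-- ===== LEMMAS AND PROOFS =====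

-- A fold whose step ignores the accumulator keeps only its last iteration.
theorem foldl_const_last {α β : Type} (g : β → α) :
    ∀ (l : List β) (a : β) (init : α),
      List.foldl (fun _ c => g c) init (a :: l) = g (l.getLastD a) := by
  intro l
  induction l with
  | nil => intro a init; rfl
  | cons b t ih => intro a init; rw [List.foldl_cons, List.foldl_cons]
                   rw [show List.foldl (fun _ c => g c) (g b) t = _ from congrFun (congrArg _ rfl) t]
                   have := ih b (g a)
                   rw [List.foldl_cons] at this
                   rw [this, List.getLastD_cons]

theorem getLast?_cons_eq (a : Char) (l : List Char) : (a :: l).getLast? = some (l.getLastD a) := by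
  induction l generalizing a with
  | nil => rfl
  | cons b t ih => rw [List.getLast?_cons_cons, ih b, List.getLastD_cons]

theorem toChars_ne_nil (n : Int) : ∃ a l, PySem.Int.toChars n = a :: l := by
  have hne : PySem.Int.toChars n ≠ [] := by
    unfold PySem.Int.toChars
    split
    · simp
    · have h10 : 0 < (Nat.toDigits 10 n.toNat).length := Nat.length_toDigits_pos
      intro h; rw [h] at h10; simp at h10
  cases hc : PySem.Int.toChars n with
  | nil => exact absurd hc hne
  | cons a l => exact ⟨a, l, rfl⟩

theorem ofList_singleton_inj {a c : Char} (h : String.ofList [a] = String.ofList [c]) : a = c := by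
  have := congrArg String.toList h
  simpa using this

theorem mem_map_singleton (d : List Char) (c : Char) :
    ((d.map (fun ch => String.ofList [ch])).contains (String.ofList [c])) = d.contains c := by
  rw [Bool.eq_iff_iff, List.contains_iff_mem, List.contains_iff_mem, List.mem_map]
  constructor
  · rintro ⟨ch, hm, he⟩
    rwa [ofList_singleton_inj he] at hm
  · intro h; exact ⟨c, h, rfl⟩

theorem isIn_singleton (c : Char) (den : Int) :
    PySem.Str.isIn (String.ofList [c]) (PySem.Int.toStr den) =
      (PySem.Int.toChars den).contains c := by
  rw [Bool.eq_iff_iff, PySem.Str.isIn_iff_infix, List.contains_iff_mem]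
  simp [PySem.Int.toList_toStr, List.singleton_infix_iff]

theorem simplifier_spec' (num den : Int) (h : PySem.Int.mod den 10 ≠ 0) :
    simplifier num den = simplifier_alt num den := by
  obtain ⟨a, l, hn⟩ := toChars_ne_nil num
  have hlast : (PySem.List.pyGet? ((PySem.Int.toChars num).map (fun c => String.ofList [c])) (-1))
      = some (String.ofList [l.getLastD a]) := by
    rw [PySem.List.pyGet?_neg_one, List.getLast?_map, hn, getLast?_cons_eq]
    rfl
  unfold simplifier simplifier_alt
  dsimp only
  rw [if_pos h, hlast, hn, foldl_const_last]
  rw [isIn_singleton, ← hn]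
  simp only [Option.getD_some]
  rw [show ((PySem.Int.toChars den).map (fun ch => String.ofList [ch])).contains
        (String.ofList [l.getLastD a]) = (PySem.Int.toChars den).contains (l.getLastD a)
      from mem_map_singleton _ _]
  by_cases hin : l.getLastD a ∈ PySem.Int.toChars den
  · simp only [List.getLastD_eq_getLast?] at hin
    simp [hin]
    exact fun hdvd => absurd ((PySem.Int.mod_eq_zero_iff_dvd den 10).mpr hdvd) h
  · simp only [List.getLastD_eq_getLast?] at hin
    simp [hin]

-- ===== VERDICT (by name: the statement is the Claim_ definition above) =====
theorem simplifier_spec : Claim_equal_simplifier := by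
  intro num den _ hpre
  exact simplifier_spec' num den hpre
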